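-- pv_equiv track=rewrite | github.com/SGK112/surprise-granite-site | scripts/selenium-scraper.py | get_color_family
-- ===== SOURCE A (Python) =====
-- def get_color_family(name: str) -> str:
--     """Determine color family from product name"""
--     name_lower = name.lower()
--     colors = {
--         'white': ['white', 'bianco', 'blanco', 'calacatta', 'carrara', 'snow', 'pearl', 'ivory', 'frost'],
--         'gray': ['gray', 'grey', 'grigio', 'concrete', 'steel', 'ash', 'slate', 'charcoal'],
--         'black': ['black', 'nero', 'noir', 'midnight', 'obsidian', 'raven', 'onyx'],
--         'brown': ['brown', 'tan', 'coffee', 'mocha', 'chocolate', 'walnut', 'bronze', 'copper'],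
--         'beige': ['beige', 'cream', 'sand', 'taupe', 'khaki', 'buff'],
--         'gold': ['gold', 'amber', 'honey', 'brass', 'champagne'],
--         'blue': ['blue', 'azul', 'navy', 'ocean', 'marine', 'cobalt'],
--         'green': ['green', 'verde', 'emerald', 'jade', 'sage', 'olive'],
--     }
--     for color, keywords in colors.items():
--         if any(kw in name_lower for kw in keywords):
--             return color
--     return 'other'
-- ===== SOURCE B (Python) =====
-- # Multi-pattern scan: walk the text positions matching all keywords at once,
-- # collect the SET of families that occur, then pick the highest-priority one.
-- _FAMILIES = ['white', 'gray', 'black', 'brown', 'beige', 'gold', 'blue', 'green']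
-- _KEYWORD_FAMILY = {
--     'white': 'white',
--     'bianco': 'white',
--     'blanco': 'white',
--     'calacatta': 'white',
--     'carrara': 'white',
--     'snow': 'white',
--     'pearl': 'white',
--     'ivory': 'white',
--     'frost': 'white',
--     'gray': 'gray',
--     'grey': 'gray',
--     'grigio': 'gray',
--     'concrete': 'gray',
--     'steel': 'gray',
--     'ash': 'gray',
--     'slate': 'gray',
--     'charcoal': 'gray',
--     'black': 'black',
--     'nero': 'black',
--     'noir': 'black',
--     'midnight': 'black',
--     'obsidian': 'black',
--     'raven': 'black',
--     'onyx': 'black',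
--     'brown': 'brown',
--     'tan': 'brown',
--     'coffee': 'brown',
--     'mocha': 'brown',
--     'chocolate': 'brown',
--     'walnut': 'brown',
--     'bronze': 'brown',
--     'copper': 'brown',
--     'beige': 'beige',
--     'cream': 'beige',
--     'sand': 'beige',
--     'taupe': 'beige',
--     'khaki': 'beige',
--     'buff': 'beige',
--     'gold': 'gold',
--     'amber': 'gold',
--     'honey': 'gold',
--     'brass': 'gold',
--     'champagne': 'gold',
--     'blue': 'blue',
--     'azul': 'blue',
--     'navy': 'blue',
--     'ocean': 'blue',
--     'marine': 'blue',
--     'cobalt': 'blue',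
--     'green': 'green',
--     'verde': 'green',
--     'emerald': 'green',
--     'jade': 'green',
--     'sage': 'green',
--     'olive': 'green',
-- }
--
--
-- def get_color_family(name: str) -> str:
--     name_lower = name.lower()
--     matched = set()
--     for i in range(len(name_lower)):
--         for kw, fam in _KEYWORD_FAMILY.items():
--             if name_lower.startswith(kw, i):
--                 matched.add(fam)
--     for fam in _FAMILIES:
--         if fam in matched:
--             return fam
--     return 'other'
-- ===== Notes on version B (the rewrite author's own statement) =====
-- stated objective: alternative
-- what changed: A short-circuits family by family with an any() substring test; B instead walks the text positions once matching all keywords simultaneously via startswith, collects the set of every family that occurs, and then selects the first family in priority order from that set.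
import Mathlib
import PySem

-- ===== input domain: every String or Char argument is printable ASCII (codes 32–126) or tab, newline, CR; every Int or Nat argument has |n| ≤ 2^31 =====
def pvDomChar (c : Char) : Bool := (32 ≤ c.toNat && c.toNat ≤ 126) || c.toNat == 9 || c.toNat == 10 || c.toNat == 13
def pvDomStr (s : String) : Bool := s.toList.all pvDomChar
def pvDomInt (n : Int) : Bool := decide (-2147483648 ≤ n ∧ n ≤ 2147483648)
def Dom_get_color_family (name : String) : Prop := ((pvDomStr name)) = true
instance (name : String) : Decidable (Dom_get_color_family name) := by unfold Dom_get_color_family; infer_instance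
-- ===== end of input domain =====

-- B replaces A's family-by-family any()-substring short-circuit with a single scan of the
-- text positions matching all keywords at once, collecting the set of matching families,
-- then a priority select over the family order ("alternative"; same asymptotic cost).

-- ===== PORT A =====
-- the dict literal 'colors', in insertion order
def pvColors : PySem.Dict String (List String) :=
  PySem.Dict.ofList [
    ("white", ["white", "bianco", "blanco", "calacatta", "carrara", "snow", "pearl", "ivory", "frost"]),
    ("gray", ["gray", "grey", "grigio", "concrete", "steel", "ash", "slate", "charcoal"]),
    ("black", ["black", "nero", "noir", "midnight", "obsidian", "raven", "onyx"]),
    ("brown", ["brown", "tan", "coffee", "mocha", "chocolate", "walnut", "bronze", "copper"]),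
    ("beige", ["beige", "cream", "sand", "taupe", "khaki", "buff"]),
    ("gold", ["gold", "amber", "honey", "brass", "champagne"]),
    ("blue", ["blue", "azul", "navy", "ocean", "marine", "cobalt"]),
    ("green", ["green", "verde", "emerald", "jade", "sage", "olive"])]

-- 'for color, keywords in colors.items(): if any(kw in name_lower for kw in keywords): return color'
def pvALoop (nameLower : String) : List (String × List String) → String
  | [] => "other"
  | (color, keywords) :: rest =>
      if keywords.any (fun kw => PySem.Str.isIn kw nameLower) then color
      else pvALoop nameLower rest

def get_color_family (name : String) : String :=
  pvALoop (PySem.Str.lower name) pvColors.items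

-- ===== PORT B =====
-- the module-level constants _FAMILIES and _KEYWORD_FAMILY
def pvFamilies : List String :=
  ["white", "gray", "black", "brown", "beige", "gold", "blue", "green"]

def pvKeywordFamily : PySem.Dict String String :=
  PySem.Dict.ofList [
    ("white", "white"),
    ("bianco", "white"),
    ("blanco", "white"),
    ("calacatta", "white"),
    ("carrara", "white"),
    ("snow", "white"),
    ("pearl", "white"),
    ("ivory", "white"),
    ("frost", "white"),
    ("gray", "gray"),
    ("grey", "gray"),
    ("grigio", "gray"),
    ("concrete", "gray"),
    ("steel", "gray"),
    ("ash", "gray"),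
    ("slate", "gray"),
    ("charcoal", "gray"),
    ("black", "black"),
    ("nero", "black"),
    ("noir", "black"),
    ("midnight", "black"),
    ("obsidian", "black"),
    ("raven", "black"),
    ("onyx", "black"),
    ("brown", "brown"),
    ("tan", "brown"),
    ("coffee", "brown"),
    ("mocha", "brown"),
    ("chocolate", "brown"),
    ("walnut", "brown"),
    ("bronze", "brown"),
    ("copper", "brown"),
    ("beige", "beige"),
    ("cream", "beige"),
    ("sand", "beige"),
    ("taupe", "beige"),
    ("khaki", "beige"),
    ("buff", "beige"),
    ("gold", "gold"),
    ("amber", "gold"),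
    ("honey", "gold"),
    ("brass", "gold"),
    ("champagne", "gold"),
    ("blue", "blue"),
    ("azul", "blue"),
    ("navy", "blue"),
    ("ocean", "blue"),
    ("marine", "blue"),
    ("cobalt", "blue"),
    ("green", "green"),
    ("verde", "green"),
    ("emerald", "green"),
    ("jade", "green"),
    ("sage", "green"),
    ("olive", "green")]

-- 'matched = set(); for i in range(len(name_lower)): for kw, fam in _KEYWORD_FAMILY.items():
--    if name_lower.startswith(kw, i): matched.add(fam)'
-- name_lower.startswith(kw, i) with 0 ≤ i is exactly 'kw is a prefix of name_lower[i:]',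
-- i.e. PySem.Chars.startswith (nl.drop i) kw — exact on this loop's indices.
def pvMatched (nl : List Char) : PySem.Set String :=
  (PySem.List.pyRange 0 (nl.length : Int) 1).foldl (fun m i =>
    pvKeywordFamily.items.foldl (fun m p =>
      if PySem.Chars.startswith (nl.drop i.toNat) p.1.toList then PySem.Set.add m p.2 else m) m)
    PySem.Set.empty

-- 'for fam in _FAMILIES: if fam in matched: return fam / return "other"'
def pvPick (m : PySem.Set String) : List String → String
  | [] => "other"
  | f :: rest => if PySem.Set.contains m f then f else pvPick m rest

def get_color_family_alt (name : String) : String :=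
  pvPick (pvMatched (PySem.Str.lower name).toList) pvFamilies

-- ===== PRECONDITION & SPEC =====
def Spec_get_color_family (name : String) (out : String) : Prop := out = get_color_family_alt name
instance (name : String) (out : String) : Decidable (Spec_get_color_family name out) := by unfold Spec_get_color_family; infer_instance

-- ===== CLAIM (what is proved, stated in full; the proofs are below) =====
def Claim_equal_get_color_family : Prop := ∀ (name : String), Dom_get_color_family name → Spec_get_color_family name (get_color_family name)

-- ===== LEMMAS AND PROOFS =====

-- membership in a conditional-add fold over a list
theorem pv_mem_foldl_add_if {α β : Type} [BEq β] [LawfulBEq β] (l : List α)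
    (c : α → Bool) (f : α → β) (s : PySem.Set β) (y : β) :
    (y ∈ l.foldl (fun s a => if c a then PySem.Set.add s (f a) else s) s) ↔
      y ∈ s ∨ ∃ a ∈ l, c a = true ∧ y = f a := by
  induction l generalizing s with
  | nil => simp
  | cons a l ih =>
      simp only [List.foldl_cons]
      by_cases h : c a = true
      · rw [if_pos h, ih]
        simp [PySem.Set.mem_add, h]
        tauto
      · rw [if_neg h, ih]
        simp [h]

-- membership in pvMatched: some table pair's keyword starts at some position of nl
theorem pv_mem_matched (nl : List Char) (y : String) :
    (y ∈ pvMatched nl) ↔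
      ∃ p ∈ pvKeywordFamily.items,
        (∃ i ∈ PySem.List.pyRange 0 (nl.length : Int) 1,
          PySem.Chars.startswith (nl.drop i.toNat) p.1.toList = true) ∧ y = p.2 := by
  unfold pvMatched
  have key : ∀ (is : List Int) (s : PySem.Set String),
      (y ∈ is.foldl (fun m i =>
        pvKeywordFamily.items.foldl (fun m p =>
          if PySem.Chars.startswith (nl.drop i.toNat) p.1.toList then PySem.Set.add m p.2 else m) m) s) ↔
      y ∈ s ∨ ∃ p ∈ pvKeywordFamily.items,
        (∃ i ∈ is, PySem.Chars.startswith (nl.drop i.toNat) p.1.toList = true) ∧ y = p.2 := by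
    intro is
    induction is with
    | nil => simp
    | cons i is ih =>
        intro s
        simp only [List.foldl_cons]
        rw [ih, pv_mem_foldl_add_if]
        constructor
        · rintro ((h | ⟨p, hp, hc, hy⟩) | ⟨p, hp, ⟨j, hj, hc⟩, hy⟩)
          · exact Or.inl h
          · exact Or.inr ⟨p, hp, ⟨i, by simp, hc⟩, hy⟩
          · exact Or.inr ⟨p, hp, ⟨j, by simp [hj], hc⟩, hy⟩
        · rintro (h | ⟨p, hp, ⟨j, hj, hc⟩, hy⟩)
          · exact Or.inl (Or.inl h)
          · rcases List.mem_cons.mp hj with rfl | hj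
            · exact Or.inl (Or.inr ⟨p, hp, hc, hy⟩)
            · exact Or.inr ⟨p, hp, ⟨j, hj, hc⟩, hy⟩
  rw [key]
  simp [PySem.Set.empty]

-- a nonempty keyword starts at some loop position iff it is a substring
theorem pv_pos_iff_isIn (nl : List Char) (kw : List Char) (hkw : kw ≠ []) :
    (∃ i ∈ PySem.List.pyRange 0 (nl.length : Int) 1,
        PySem.Chars.startswith (nl.drop i.toNat) kw = true) ↔
      PySem.Chars.isIn kw nl = true := by
  rw [← PySem.Chars.exists_prefix_drop_iff_isIn]
  constructor
  · rintro ⟨i, hi, hs⟩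
    exact ⟨i.toNat, (PySem.Chars.startswith_iff _ _).mp hs⟩
  · rintro ⟨j, hj⟩
    have hjlt : j < nl.length := by
      by_contra h
      rw [List.drop_eq_nil_of_le (by omega)] at hj
      exact hkw (List.prefix_nil.mp hj)
    refine ⟨(j : Int), ?_, (PySem.Chars.startswith_iff _ _).mpr (by simpa using hj)⟩
    rw [PySem.List.mem_pyRange_one]
    omega

-- every keyword of the table is nonempty
set_option maxRecDepth 4096 in
theorem pv_kw_ne_nil : ∀ p ∈ pvKeywordFamily.items, p.1.toList ≠ [] := by decide

-- y ∈ matched iff some family's keyword list (in A's dict) has a substring hit with y its family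
theorem pv_mem_matched_isIn (nl : List Char) (y : String) :
    (y ∈ pvMatched nl) ↔
      ∃ p ∈ pvKeywordFamily.items, PySem.Chars.isIn p.1.toList nl = true ∧ y = p.2 := by
  rw [pv_mem_matched]
  constructor
  · rintro ⟨p, hp, hpos, hy⟩
    exact ⟨p, hp, (pv_pos_iff_isIn nl p.1.toList (pv_kw_ne_nil p hp)).mp hpos, hy⟩
  · rintro ⟨p, hp, hin, hy⟩
    exact ⟨p, hp, (pv_pos_iff_isIn nl p.1.toList (pv_kw_ne_nil p hp)).mpr hin, hy⟩

-- the priority select over the matched set equals A's short-circuit loop, given that each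
-- family is in the set exactly when one of its keywords is a substring
theorem pv_pick_eq_aloop (nl : String) (M : PySem.Set String) :
    ∀ (gs : List (String × List String)),
      (∀ g ∈ gs, ((PySem.Set.contains M g.1 = true) ↔
        g.2.any (fun kw => PySem.Str.isIn kw nl) = true)) →
      pvPick M (gs.map (·.1)) = pvALoop nl gs := by
  intro gs
  induction gs with
  | nil => intro _; rfl
  | cons g rest ih =>
      intro h
      obtain ⟨color, keywords⟩ := g
      simp only [List.map_cons, pvPick, pvALoop]
      have hg := h _ (List.mem_cons_self ..)
      by_cases hc : PySem.Set.contains M color = true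
      · rw [if_pos hc, if_pos (hg.mp hc)]
      · rw [if_neg hc, if_neg (fun ha => hc (hg.mpr ha))]
        exact ih (fun g hgr => h g (List.mem_cons_of_mem _ hgr))

-- ===== VERDICT (by name: the statement is the Claim_ definition above) =====
set_option maxRecDepth 4096 in
theorem get_color_family_spec : Claim_equal_get_color_family := by
  intro name _
  unfold Spec_get_color_family get_color_family get_color_family_alt
  set nl := PySem.Str.lower name with hnl
  have hfam : pvFamilies = pvColors.items.map (·.1) := by rfl
  rw [hfam]
  symm
  apply pv_pick_eq_aloop
  intro g hg
  rw [PySem.Set.contains_iff, pv_mem_matched_isIn]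
  have hitems : pvKeywordFamily.items = [
    ("white", "white"), ("bianco", "white"), ("blanco", "white"), ("calacatta", "white"),
    ("carrara", "white"), ("snow", "white"), ("pearl", "white"), ("ivory", "white"),
    ("frost", "white"), ("gray", "gray"), ("grey", "gray"), ("grigio", "gray"),
    ("concrete", "gray"), ("steel", "gray"), ("ash", "gray"), ("slate", "gray"),
    ("charcoal", "gray"), ("black", "black"), ("nero", "black"), ("noir", "black"),
    ("midnight", "black"), ("obsidian", "black"), ("raven", "black"), ("onyx", "black"),
    ("brown", "brown"), ("tan", "brown"), ("coffee", "brown"), ("mocha", "brown"),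
    ("chocolate", "brown"), ("walnut", "brown"), ("bronze", "brown"), ("copper", "brown"),
    ("beige", "beige"), ("cream", "beige"), ("sand", "beige"), ("taupe", "beige"),
    ("khaki", "beige"), ("buff", "beige"), ("gold", "gold"), ("amber", "gold"),
    ("honey", "gold"), ("brass", "gold"), ("champagne", "gold"), ("blue", "blue"),
    ("azul", "blue"), ("navy", "blue"), ("ocean", "blue"), ("marine", "blue"),
    ("cobalt", "blue"), ("green", "green"), ("verde", "green"), ("emerald", "green"),
    ("jade", "green"), ("sage", "green"), ("olive", "green")] := by rfl
  rw [hitems]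
  fin_cases hg <;> simp
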